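-- pv_equiv track=rewrite | github.com/Aasthaengg/IBMdataset | Python_codes/p03096/s304670904.py | solve
-- ===== SOURCE A (Python) =====
-- def solve(N, Cs):
--     dp = [-1 for _ in Cs]
--     latest_c = {}
--     ans = 1
--     d = 10 ** 9 + 7
--     for i, c in enumerate(Cs):
--         if c not in latest_c:
--             latest_c[c] = i
--             dp[i] = ans
--         else:
--             previous_i = latest_c[c]
--             if previous_i != i - 1:
--                 ans += dp[previous_i]
--             latest_c[c] = i
--             dp[i] = ans
--     return ans % d
-- ===== SOURCE B (Python) =====
-- def solve(N, Cs):
--     comp = []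
--     for c in Cs:
--         if not comp or comp[-1] != c:
--             comp.append(c)
--     f = 1
--     right = {}
--     for c in reversed(comp):
--         f = f + right.get(c, 0)
--         right[c] = f
--     return f % (10 ** 9 + 7)
-- ===== Notes on version B (the rewrite author's own statement) =====
-- stated objective: alternative
-- what changed: A runs a forward DP over original positions with a full-size dp array, a last-occurrence-index dict and an inline adjacency check; B first removes consecutive duplicates, then traverses the compressed list RIGHT-TO-LEFT keeping only a scalar (the number of removal orders of the suffix seen so far) and a dict from color to that suffix-count at the color's leftmost-seen occurrence -- i.e. it counts paths in the jump DAG from the sink backwards, with no positional indices and no dp array.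
import Mathlib
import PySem

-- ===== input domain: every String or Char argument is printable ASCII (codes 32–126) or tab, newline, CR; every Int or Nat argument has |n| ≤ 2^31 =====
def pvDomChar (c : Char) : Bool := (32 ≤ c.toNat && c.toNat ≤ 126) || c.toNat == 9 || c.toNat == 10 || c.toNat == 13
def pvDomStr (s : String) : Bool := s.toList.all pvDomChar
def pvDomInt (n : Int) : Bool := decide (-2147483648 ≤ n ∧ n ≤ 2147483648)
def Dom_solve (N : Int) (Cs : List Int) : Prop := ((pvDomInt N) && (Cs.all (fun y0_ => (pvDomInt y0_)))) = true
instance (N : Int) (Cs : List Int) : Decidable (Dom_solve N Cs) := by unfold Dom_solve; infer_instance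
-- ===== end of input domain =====

-- B replaces A's forward positional DP (full-size dp array, last-occurrence-index dict, inline
-- adjacency check) by a compression pass followed by a RIGHT-TO-LEFT scan that keeps only a
-- scalar suffix path-count and a dict from color to the count at its leftmost-seen occurrence;
-- objective: alternative. Both are total; equivalence is proved on the whole domain.

-- ===== PORT A =====
-- one iteration of A's 'for i, c in enumerate(Cs)' loop; state = (dp, latest_c, ans)
def solveStep (st : List Int × PySem.Dict Int Int × Int) (ic : Int × Int) :
    List Int × PySem.Dict Int Int × Int :=
  match st.2.1.get? ic.2 with
  | none => (PySem.List.pySetD st.1 ic.1 st.2.2, st.2.1.insert ic.2 ic.1, st.2.2)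
  | some p =>
      -- dp[previous_i]: previous_i is always a valid non-negative index, so pyGetD is exact here
      let ans' := if p ≠ ic.1 - 1 then st.2.2 + PySem.List.pyGetD st.1 p 0 else st.2.2
      (PySem.List.pySetD st.1 ic.1 ans', st.2.1.insert ic.2 ic.1, ans')

def solve (N : Int) (Cs : List Int) : Int :=
  PySem.Int.mod
    ((PySem.List.enumerate Cs 0).foldl solveStep
      (Cs.map (fun _ => (-1 : Int)), PySem.Dict.empty, 1)).2.2
    (10 ^ 9 + 7)

-- ===== PORT B =====
-- 'if not comp or comp[-1] != c: comp.append(c)'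
def altCompStep (acc : List Int) (c : Int) : List Int :=
  if acc = [] ∨ PySem.List.pyGetD acc (-1) 0 ≠ c then acc ++ [c] else acc

-- one iteration of B's 'for c in reversed(comp)' loop; state = (f, right)
def altStep (st : Int × PySem.Dict Int Int) (c : Int) : Int × PySem.Dict Int Int :=
  let f := st.1 + st.2.getD c 0
  (f, st.2.insert c f)

def solve_alt (N : Int) (Cs : List Int) : Int :=
  PySem.Int.mod
    ((Cs.foldl altCompStep []).reverse.foldl altStep (1, PySem.Dict.empty)).1
    (10 ^ 9 + 7)

-- ===== PRECONDITION & SPEC =====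
def Spec_solve (N : Int) (Cs : List Int) (out : Int) : Prop := out = solve_alt N Cs
instance (N : Int) (Cs : List Int) (out : Int) : Decidable (Spec_solve N Cs out) := by unfold Spec_solve; infer_instance

-- ===== CLAIM (what is proved, stated in full; the proofs are below) =====
def Claim_equal_solve : Prop := ∀ (N : Int) (Cs : List Int), Dom_solve N Cs → Spec_solve N Cs (solve N Cs)

-- ===== LEMMAS AND PROOFS =====

-- common abstract recurrence A computes: state = (ans, map color ↦ count at its
-- latest occurrence, previous color); adjacent repeats leave the abstract state unchanged
def fspec : List Int → Int → PySem.Dict Int Int → Option Int → Int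
  | [], ans, _, _ => ans
  | c :: rest, ans, m, prev =>
    if prev = some c then fspec rest ans m prev
    else match m.get? c with
      | none => fspec rest ans (m.insert c ans) (some c)
      | some v => fspec rest (ans + v) (m.insert c (ans + v)) (some c)

-- fspec with the adjacency branch removed (the forward recurrence on the compressed list)
def fspec2 : List Int → Int → PySem.Dict Int Int → Int
  | [], ans, _ => ans
  | c :: rest, ans, m =>
    match m.get? c with
    | none => fspec2 rest ans (m.insert c ans)
    | some v => fspec2 rest (ans + v) (m.insert c (ans + v))

-- structural form of B's compression pass
def compress : Option Int → List Int → List Int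
  | _, [] => []
  | prev, c :: rest => if prev = some c then compress prev rest else c :: compress (some c) rest

theorem compress_cons (prev : Option Int) (c : Int) (rest : List Int) :
    compress prev (c :: rest) =
      if prev = some c then compress prev rest else c :: compress (some c) rest := rfl

theorem fspec_cons (c : Int) (rest : List Int) (ans : Int) (m : PySem.Dict Int Int)
    (prev : Option Int) :
    fspec (c :: rest) ans m prev =
      if prev = some c then fspec rest ans m prev
      else match m.get? c with
        | none => fspec rest ans (m.insert c ans) (some c)
        | some v => fspec rest (ans + v) (m.insert c (ans + v)) (some c) := rfl

theorem fspec2_cons (c : Int) (rest : List Int) (ans : Int) (m : PySem.Dict Int Int) :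
    fspec2 (c :: rest) ans m =
      match m.get? c with
      | none => fspec2 rest ans (m.insert c ans)
      | some v => fspec2 rest (ans + v) (m.insert c (ans + v)) := rfl

theorem foldl_altCompStep (cs : List Int) : ∀ (acc : List Int),
    cs.foldl altCompStep acc = acc ++ compress acc.getLast? cs := by
  induction cs with
  | nil => intro acc; simp [compress]
  | cons c rest ih =>
    intro acc
    rcases eq_or_ne acc [] with rfl | hne
    · simp [altCompStep, ih, compress]
    · have hlast : PySem.List.pyGetD acc (-1) 0 = acc.getLast hne :=
        PySem.List.pyGetD_neg_one acc 0 hne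
      have hget : acc.getLast? = some (acc.getLast hne) := List.getLast?_eq_some_getLast hne
      rcases eq_or_ne (acc.getLast hne) c with heq | hneq
      · have hcond : ¬ (acc = [] ∨ PySem.List.pyGetD acc (-1) 0 ≠ c) := by
          simp [hne, hlast, heq]
        simp only [List.foldl_cons, altCompStep, if_neg hcond]
        rw [ih acc, hget, heq, compress_cons, if_pos rfl]
      · have hcond : (acc = [] ∨ PySem.List.pyGetD acc (-1) 0 ≠ c) := by
          right; rw [hlast]; exact hneq
        simp only [List.foldl_cons, altCompStep, if_pos hcond]
        rw [ih (acc ++ [c]), hget, compress_cons,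
            if_neg (by simpa using hneq)]
        simp

theorem fspec_compress : ∀ (cs : List Int) (prev : Option Int) (ans : Int)
    (m : PySem.Dict Int Int), fspec (compress prev cs) ans m prev = fspec cs ans m prev := by
  intro cs
  induction cs with
  | nil => intro prev ans m; simp [compress]
  | cons c rest ih =>
    intro prev ans m
    by_cases h : prev = some c
    · rw [compress_cons, if_pos h, fspec_cons, if_pos h, ih]
    · rw [compress_cons, if_neg h]
      rw [fspec_cons, if_neg h, fspec_cons, if_neg h]
      cases m.get? c with
      | none => exact ih _ _ _
      | some v => exact ih _ _ _

theorem fspec_compress_eq_fspec2 : ∀ (cs : List Int) (prev : Option Int) (ans : Int)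
    (m : PySem.Dict Int Int), fspec (compress prev cs) ans m prev = fspec2 (compress prev cs) ans m := by
  intro cs
  induction cs with
  | nil => intro prev ans m; simp [compress, fspec, fspec2]
  | cons c rest ih =>
    intro prev ans m
    by_cases h : prev = some c
    · rw [compress_cons, if_pos h]; exact ih prev ans m
    · rw [compress_cons, if_neg h, fspec_cons, if_neg h, fspec2_cons]
      cases m.get? c with
      | none => exact ih (some c) ans (m.insert c ans)
      | some v => exact ih (some c) (ans + v) (m.insert c (ans + v))

-- A's loop computes fspec
theorem loopA_eq_fspec : ∀ (cs : List Int) (n : Nat) (dp : List Int)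
    (latest m : PySem.Dict Int Int) (ans : Int) (prev : Option Int),
    dp.length = n + cs.length →
    (∀ c, latest.get? c = none ↔ m.get? c = none) →
    (∀ c p, latest.get? c = some p → ∃ v, m.get? c = some v ∧ 0 ≤ p ∧ p < (n : Int) ∧
      PySem.List.pyGetD dp p 0 = v) →
    (∀ c p, latest.get? c = some p → (p = (n : Int) - 1 ↔ prev = some c)) →
    (∀ c, prev = some c → m.get? c = some ans) →
    ((PySem.List.enumerate cs (n : Int)).foldl solveStep (dp, latest, ans)).2.2 =
      fspec cs ans m prev := by
  intro cs
  induction cs with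
  | nil => intro n dp latest m ans prev _ _ _ _ _; simp [PySem.List.enumerate_nil, fspec]
  | cons c rest ih =>
    intro n dp latest m ans prev hlen hkey hval hprev hpans
    have hn : n < dp.length := by simp at hlen; omega
    rw [PySem.List.enumerate_cons, List.foldl_cons]
    have hstep : solveStep (dp, latest, ans) ((n : Int), c) =
        match latest.get? c with
        | none => (PySem.List.pySetD dp (n : Int) ans, latest.insert c (n : Int), ans)
        | some p =>
            let ans' := if p ≠ (n : Int) - 1 then ans + PySem.List.pyGetD dp p 0 else ans
            (PySem.List.pySetD dp (n : Int) ans', latest.insert c (n : Int), ans') := rfl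
    -- key fact for re-establishing the invariant after dp[n] := a, latest[c] := n, m' := m.insert c a
    have reinv : ∀ (a : Int) (m' : PySem.Dict Int Int), m'.get? c = some a →
        (∀ c', c' ≠ c → m'.get? c' = m.get? c') →
        ((PySem.List.enumerate rest ((n : Int) + 1)).foldl solveStep
          (PySem.List.pySetD dp (n : Int) a, latest.insert c (n : Int), a)).2.2 =
        fspec rest a m' (some c) := by
      intro a m' hm'c hm'ne
      have hcast : ((n : Int) + 1) = ((n + 1 : Nat) : Int) := by push_cast; ring
      rw [hcast]
      apply ih (n + 1)
      · rw [PySem.List.length_pySetD]; simp at hlen ⊢; omega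
      · intro c'
        rcases eq_or_ne c' c with rfl | hne
        · rw [PySem.Dict.get?_insert_self, hm'c]; simp
        · rw [PySem.Dict.get?_insert_of_ne _ _ hne, hm'ne c' hne]; exact hkey c'
      · intro c' p hp
        rcases eq_or_ne c' c with rfl | hne
        · rw [PySem.Dict.get?_insert_self] at hp
          refine ⟨a, hm'c, ?_⟩
          cases hp
          refine ⟨by positivity, by push_cast; omega, ?_⟩
          rw [PySem.List.pySetD_natCast, PySem.List.pyGetD_natCast]
          simp [List.getD_eq_getElem?_getD, List.getElem?_set_self hn]
        · rw [PySem.Dict.get?_insert_of_ne _ _ hne] at hp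
          obtain ⟨v, hv, h0, h1, hg⟩ := hval c' p hp
          refine ⟨v, by rw [hm'ne c' hne]; exact hv, h0, by push_cast; omega, ?_⟩
          rw [PySem.List.pySetD_natCast, ← hg,
              PySem.List.pyGetD_eq_getElem _ 0 h0 (by simp; exact_mod_cast h1.trans_le (by exact_mod_cast Nat.cast_le.mpr (le_of_lt hn))),
              PySem.List.pyGetD_eq_getElem _ 0 h0 (by exact_mod_cast h1.trans_le (by exact_mod_cast Nat.cast_le.mpr (le_of_lt hn)))]
          rw [List.getElem_set_ne (by omega)]
      · intro c' p hp
        rcases eq_or_ne c' c with rfl | hne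
        · rw [PySem.Dict.get?_insert_self] at hp
          cases hp
          constructor
          · intro _; rfl
          · intro _; push_cast; ring
        · rw [PySem.Dict.get?_insert_of_ne _ _ hne] at hp
          obtain ⟨v, _, h0, h1, _⟩ := hval c' p hp
          constructor
          · intro h; exfalso; push_cast at h; omega
          · intro h; exfalso; injection h with h'; exact hne h'.symm
      · intro c' hc'
        have hcc : c' = c := (by simpa using hc' : c = c').symm
        subst hcc; exact hm'c
    cases hlat : latest.get? c with
    | none =>
      have hmnone : m.get? c = none := (hkey c).mp hlat
      have hprevne : prev ≠ some c := by
        intro h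
        have := hpans c h
        rw [hmnone] at this; cases this
      rw [hstep]
      simp only [hlat]
      rw [fspec_cons, if_neg hprevne]
      simp only [hmnone]
      exact reinv ans (m.insert c ans) (PySem.Dict.get?_insert_self ..)
        (fun c' hne => PySem.Dict.get?_insert_of_ne _ _ hne)
    | some p =>
      obtain ⟨v, hv, h0, h1, hg⟩ := hval c p hlat
      have hstep2 : solveStep (dp, latest, ans) ((n : Int), c) =
          (PySem.List.pySetD dp (n : Int)
            (if p ≠ (n : Int) - 1 then ans + PySem.List.pyGetD dp p 0 else ans),
           latest.insert c (n : Int),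
           (if p ≠ (n : Int) - 1 then ans + PySem.List.pyGetD dp p 0 else ans)) := by
        simp only [solveStep, hlat]
      by_cases hadj : p = (n : Int) - 1
      · -- adjacent repeat: A adds nothing; fspec's skip branch
        have hprevc : prev = some c := (hprev c p hlat).mp hadj
        have hva : v = ans := by
          have := hpans c hprevc
          rw [hv] at this; exact (Option.some.injEq ..).mp this
        rw [hstep2, if_neg (not_not_intro hadj), fspec_cons, if_pos hprevc]
        have hrw : fspec rest ans m prev = fspec rest ans m (some c) := by rw [hprevc]
        rw [hrw]
        exact reinv ans m (by rw [hv, hva]) (fun _ _ => rfl)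
      · -- non-adjacent repeat: ans += dp[previous_i]
        have hprevne : prev ≠ some c := fun h => hadj ((hprev c p hlat).mpr h)
        rw [hstep2, if_pos hadj, fspec_cons, if_neg hprevne]
        simp only [hv, hg]
        exact reinv (ans + v) (m.insert c (ans + v)) (PySem.Dict.get?_insert_self ..)
          (fun c' hne => PySem.Dict.get?_insert_of_ne _ _ hne)

theorem solve_eq_fspec (N : Int) (Cs : List Int) :
    solve N Cs = PySem.Int.mod (fspec Cs 1 PySem.Dict.empty none) (10 ^ 9 + 7) := by
  unfold solve
  congr 1
  apply loopA_eq_fspec Cs 0 (Cs.map (fun _ => (-1 : Int))) PySem.Dict.empty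
    PySem.Dict.empty 1 none
  · simp
  · intro c; simp [PySem.Dict.get?_empty]
  · intro c p hp; rw [PySem.Dict.get?_empty] at hp; cases hp
  · intro c p hp; rw [PySem.Dict.get?_empty] at hp; cases hp
  · intro c hc; cases hc

-- ========== total-function (default-0) model of the forward recurrence ==========
-- a missing key behaves exactly like value 0, so both loops are linear maps on (ans, m)

def upd (m : Int → Int) (c v : Int) : Int → Int := fun x => if x = c then v else m x

def fstep (s : Int × (Int → Int)) (c : Int) : Int × (Int → Int) :=
  (s.1 + s.2 c, upd s.2 c (s.1 + s.2 c))

def Fs (cs : List Int) (s : Int × (Int → Int)) : Int × (Int → Int) := cs.foldl fstep s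

def zf : Int → Int := fun _ => 0

def ec (c : Int) : Int → Int := upd zf c 1

theorem Fs_cons (c : Int) (cs : List Int) (s : Int × (Int → Int)) :
    Fs (c :: cs) s = Fs cs (fstep s c) := rfl

theorem Fs_append (xs ys : List Int) (s : Int × (Int → Int)) :
    Fs (xs ++ ys) s = Fs ys (Fs xs s) := List.foldl_append ..

-- fspec2 with a dict is the total-function recurrence
theorem fspec2_eq_Fs : ∀ (cs : List Int) (ans : Int) (m : PySem.Dict Int Int),
    fspec2 cs ans m = (Fs cs (ans, fun x => (m.get? x).getD 0)).1 := by
  intro cs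
  induction cs with
  | nil => intro ans m; rfl
  | cons c rest ih =>
    intro ans m
    have hupd : ∀ w : Int,
        (fun x => (((m.insert c w).get? x).getD 0 : Int)) =
          upd (fun x => ((m.get? x).getD 0 : Int)) c w := by
      intro w; funext x
      rcases eq_or_ne x c with rfl | hne
      · simp [upd, PySem.Dict.get?_insert_self]
      · simp [upd, PySem.Dict.get?_insert_of_ne _ _ hne, hne]
    rw [fspec2_cons, Fs_cons]
    cases hm : m.get? c with
    | none =>
      show fspec2 rest ans (m.insert c ans) = _
      have hst : fstep (ans, fun x => ((m.get? x).getD 0 : Int)) c =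
          (ans, upd (fun x => ((m.get? x).getD 0 : Int)) c ans) := by
        simp [fstep, hm]
      rw [hst, ih ans (m.insert c ans), hupd]
    | some v =>
      show fspec2 rest (ans + v) (m.insert c (ans + v)) = _
      have hst : fstep (ans, fun x => ((m.get? x).getD 0 : Int)) c =
          (ans + v, upd (fun x => ((m.get? x).getD 0 : Int)) c (ans + v)) := by
        simp [fstep, hm]
      rw [hst, ih (ans + v) (m.insert c (ans + v)), hupd]

-- B's backward loop is the total-function recurrence on the reversed list
theorem altloop_eq_Fs : ∀ (xs : List Int) (f : Int) (d : PySem.Dict Int Int),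
    (xs.foldl altStep (f, d)).1 = (Fs xs (f, fun x => d.getD x 0)).1 := by
  intro xs
  induction xs with
  | nil => intro f d; rfl
  | cons c rest ih =>
    intro f d
    have hupd : (fun x => ((d.insert c (f + d.getD c 0)).getD x 0 : Int)) =
        upd (fun x => (d.getD x 0 : Int)) c (f + d.getD c 0) := by
      funext x
      rw [PySem.Dict.getD_insert]
      simp [upd]
    rw [List.foldl_cons, Fs_cons]
    show ((rest.foldl altStep (f + d.getD c 0, d.insert c (f + d.getD c 0))).1 = _)
    rw [ih (f + d.getD c 0) (d.insert c (f + d.getD c 0)), hupd]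
    rfl

-- linearity of the recurrence
def sadd (s t : Int × (Int → Int)) : Int × (Int → Int) :=
  (s.1 + t.1, fun x => s.2 x + t.2 x)

theorem fstep_add (s t : Int × (Int → Int)) (c : Int) :
    fstep (sadd s t) c = sadd (fstep s c) (fstep t c) := by
  unfold fstep sadd upd
  refine Prod.ext (by ring) ?_
  funext x
  by_cases h : x = c
  · simp [h]; ring
  · simp [h]

theorem Fs_add : ∀ (cs : List Int) (s t : Int × (Int → Int)),
    Fs cs (sadd s t) = sadd (Fs cs s) (Fs cs t) := by
  intro cs
  induction cs with
  | nil => intro s t; rfl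
  | cons c rest ih => intro s t; rw [Fs_cons, fstep_add, ih, Fs_cons, Fs_cons]

-- folding over colors ≠ c does not change the entry at c
theorem Fs_snd_not_mem (c : Int) : ∀ (xs : List Int) (s : Int × (Int → Int)),
    c ∉ xs → (Fs xs s).2 c = s.2 c := by
  intro xs
  induction xs with
  | nil => intro s _; rfl
  | cons x rest ih =>
    intro s h
    rw [Fs_cons, ih _ (fun hm => h (List.mem_cons_of_mem x hm))]
    have hxc : c ≠ x := fun hh => h (hh ▸ List.mem_cons_self ..)
    simp [fstep, upd, hxc]

-- the pure impulse state (0, ec c) is preserved by colors ≠ c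
theorem Fs_impulse (c : Int) : ∀ (p : List Int), c ∉ p →
    Fs p ((0 : Int), ec c) = ((0 : Int), ec c) := by
  intro p
  induction p with
  | nil => intro _; rfl
  | cons x rest ih =>
    intro h
    have hxc : x ≠ c := fun hh => h (hh ▸ List.mem_cons_self ..)
    have hx0 : ec c x = 0 := by simp [ec, upd, zf, hxc]
    have hstep : fstep ((0 : Int), ec c) x = ((0 : Int), ec c) := by
      unfold fstep
      refine Prod.ext (by simp [hx0]) ?_
      funext y
      rcases eq_or_ne y x with rfl | hyx
      · simp [upd, hx0]
      · simp [upd, hyx]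
    rw [Fs_cons, hstep, ih (fun hm => h (List.mem_cons_of_mem x hm))]

theorem fstep_one_zf (c : Int) : fstep ((1 : Int), zf) c = ((1 : Int), ec c) := by
  unfold fstep
  refine Prod.ext (by simp [zf]) ?_
  funext y
  simp [upd, ec, zf]

theorem fstep_impulse_self (c : Int) : fstep ((0 : Int), ec c) c = ((1 : Int), ec c) := by
  unfold fstep
  have h1 : ec c c = 1 := by simp [ec, upd]
  refine Prod.ext (by simp [h1]) ?_
  funext y
  rcases eq_or_ne y c with rfl | hyc
  · simp [upd, ec]
  · simp [upd, hyc]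

-- decomposition at the first occurrence
theorem first_occ (c : Int) : ∀ (ys : List Int),
    c ∉ ys ∨ ∃ p t, ys = p ++ c :: t ∧ c ∉ p := by
  intro ys
  induction ys with
  | nil => left; simp
  | cons y rest ih =>
    rcases eq_or_ne y c with rfl | hyc
    · right; exact ⟨[], rest, rfl, by simp⟩
    · rcases ih with h | ⟨p, t, hpt, hp⟩
      · left; simp [hyc.symm, h]
      · right
        exact ⟨y :: p, t, by rw [hpt]; rfl, by simp [hyc.symm, hp]⟩

-- head expansion of the forward count: (1, ec c) = (1, zf) + (0, ec c)
theorem head_split (c : Int) (ys : List Int) :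
    (Fs (c :: ys) ((1 : Int), zf)).1 =
      (Fs ys ((1 : Int), zf)).1 + (Fs ys ((0 : Int), ec c)).1 := by
  have hsadd : ((1 : Int), ec c) = sadd ((1 : Int), zf) ((0 : Int), ec c) := by
    refine Prod.ext (by simp [sadd]) ?_
    funext x; simp [sadd, zf]
  rw [Fs_cons, fstep_one_zf, hsadd, Fs_add]
  rfl

-- impulse term: 0 before the first occurrence of c, then the count of c :: (suffix)
theorem impulse_none (c : Int) (ys : List Int) (h : c ∉ ys) :
    (Fs ys ((0 : Int), ec c)).1 = 0 := by
  rw [Fs_impulse c ys h]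

theorem impulse_first (c : Int) (p t : List Int) (hp : c ∉ p) :
    (Fs (p ++ c :: t) ((0 : Int), ec c)).1 = (Fs (c :: t) ((1 : Int), zf)).1 := by
  rw [Fs_append, Fs_impulse c p hp, Fs_cons, fstep_impulse_self, Fs_cons, fstep_one_zf]

-- snoc expansion of the reversed-side count
theorem snoc_split (c : Int) (xs : List Int) :
    (Fs (xs ++ [c]) ((1 : Int), zf)).1 =
      (Fs xs ((1 : Int), zf)).1 + (Fs xs ((1 : Int), zf)).2 c := by
  rw [Fs_append]
  rfl

-- the value stored at c after a run whose last occurrence of c is followed only by non-c's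
theorem stored_value (c : Int) (xs q : List Int) (hq : c ∉ q) (s : Int × (Int → Int)) :
    (Fs (xs ++ c :: q) s).2 c = (Fs (xs ++ [c]) s).1 := by
  rw [Fs_append, Fs_cons, Fs_snd_not_mem c q _ hq, Fs_append]
  show (fstep (Fs xs s) c).2 c = (Fs [c] (Fs xs s)).1
  simp [Fs, fstep, upd]

-- MAIN: the forward count is invariant under list reversal (path-count duality)
theorem rev_invariant : ∀ (n : Nat) (cs : List Int), cs.length ≤ n →
    (Fs cs ((1 : Int), zf)).1 = (Fs cs.reverse ((1 : Int), zf)).1 := by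
  intro n
  induction n with
  | zero =>
    intro cs h
    have : cs = [] := List.eq_nil_of_length_eq_zero (Nat.le_zero.mp h)
    subst this; rfl
  | succ n ih =>
    intro cs h
    cases cs with
    | nil => rfl
    | cons c ys =>
      have hys : ys.length ≤ n := by simp at h; omega
      have hrev : (c :: ys).reverse = ys.reverse ++ [c] := by simp
      rcases first_occ c ys with hno | ⟨p, t, hpt, hp⟩
      · -- c occurs only at the head
        have hL : (Fs (c :: ys) ((1 : Int), zf)).1 = (Fs ys ((1 : Int), zf)).1 := by
          rw [head_split, impulse_none c ys hno, add_zero]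
        have hR2 : (Fs ys.reverse ((1 : Int), zf)).2 c = 0 := by
          rw [Fs_snd_not_mem c ys.reverse _ (by simpa using hno)]; rfl
        rw [hL, hrev, snoc_split, hR2, add_zero]
        exact ih ys hys
      · -- first occurrence of c in ys at the border p / c :: t
        have ht : (c :: t).length ≤ n := by
          subst hpt; simp at hys ⊢; omega
        have hL : (Fs (c :: ys) ((1 : Int), zf)).1 =
            (Fs ys ((1 : Int), zf)).1 + (Fs (c :: t) ((1 : Int), zf)).1 := by
          rw [head_split, hpt, impulse_first c p t hp]
        have hrev2 : ys.reverse = t.reverse ++ c :: p.reverse := by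
          rw [hpt]; simp
        have hR2 : (Fs ys.reverse ((1 : Int), zf)).2 c =
            (Fs (t.reverse ++ [c]) ((1 : Int), zf)).1 := by
          rw [hrev2, stored_value c t.reverse p.reverse (by simpa using hp)]
        have hrevct : (c :: t).reverse = t.reverse ++ [c] := by simp
        rw [hL, hrev, snoc_split, hR2, ih ys hys, ← hrevct, ← ih (c :: t) ht]

theorem solve_alt_eq_fspec (N : Int) (Cs : List Int) :
    solve_alt N Cs = PySem.Int.mod (fspec Cs 1 PySem.Dict.empty none) (10 ^ 9 + 7) := by
  unfold solve_alt
  have hcomp : Cs.foldl altCompStep [] = compress none Cs := by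
    rw [foldl_altCompStep Cs []]; simp
  rw [hcomp]
  congr 1
  have hz1 : (fun x => ((PySem.Dict.empty : PySem.Dict Int Int).getD x 0 : Int)) = zf := by
    funext x; simp [PySem.Dict.getD_empty, zf]
  have hz2 : (fun x => (((PySem.Dict.empty : PySem.Dict Int Int).get? x).getD 0 : Int)) = zf := by
    funext x; simp [PySem.Dict.get?_empty, zf]
  rw [altloop_eq_Fs, hz1,
      ← rev_invariant (compress none Cs).length (compress none Cs) le_rfl,
      ← hz2, ← fspec2_eq_Fs, ← fspec_compress_eq_fspec2 Cs none 1 PySem.Dict.empty,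
      fspec_compress Cs none 1 PySem.Dict.empty]

-- ===== VERDICT (by name: the statement is the Claim_ definition above) =====
theorem solve_spec : Claim_equal_solve := by
  intro N Cs _
  unfold Spec_solve
  rw [solve_eq_fspec, solve_alt_eq_fspec]
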